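-- pv_equiv track=rewrite | github.com/tribixbite/imaginize | scripts/compile_webp_album.py | extract_smart_caption
-- ===== SOURCE A (Python) =====
-- def extract_smart_caption(desc):
--     """Extract a concise caption (5-8 words) focusing on subject and location."""
--     if not desc:
--         return ""
--
--     words = desc.split()
--     result = []
--
--     # Words to skip entirely
--     skip = {'a', 'an', 'the', 'is', 'are', 'was', 'were', 'has', 'have', 'had',
--             'and', 'or', 'but', 'with', 'by', 'for', 'to', 'from', 'of',
--             'tall', 'short', 'out', 'shape', 'dressed', 'appearing', 'blurred',
--             'contrasting', 'standing', 'sitting', 'looking', 'like'}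
--
--     # Capture first sentence only (before first period)
--     first_sentence = []
--     for w in words:
--         first_sentence.append(w)
--         if w.endswith('.'):
--             break
--
--     # Build caption from key words, preserving proper nouns
--     for word in first_sentence:
--         clean = word.rstrip(',.;:')
--         if not clean:
--             continue
--
--         # Always keep capitalized words (proper nouns) and location prepositions
--         if clean[0].isupper() or clean.lower() in ['in', 'at', 'on', 'near', 'before']:
--             result.append(clean)
--         elif clean.lower() not in skip and len(clean) > 2:
--             result.append(clean)
--
--         if len(result) >= 7:
--             break
--
--     return ' '.join(result) if result else desc[:50]
-- ===== SOURCE B (Python) =====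
-- def extract_smart_caption(desc):
--     """Extract a concise caption (5-8 words) focusing on subject and location."""
--     if not desc:
--         return ""
--
--     skip = {'a', 'an', 'the', 'is', 'are', 'was', 'were', 'has', 'have', 'had',
--             'and', 'or', 'but', 'with', 'by', 'for', 'to', 'from', 'of',
--             'tall', 'short', 'out', 'shape', 'dressed', 'appearing', 'blurred',
--             'contrasting', 'standing', 'sitting', 'looking', 'like'}
--
--     words = desc.split()
--
--     def pick(i, n):
--         # Caption words among words[i:], at most n, built front-to-back:
--         # walk past unkept words, recurse (depth <= n) on each kept word;
--         # a sentence-ending word empties the tail.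
--         if n == 0:
--             return []
--         while i < len(words):
--             w = words[i]
--             c = w.rstrip(',.;:')
--             if c and (c[0].isupper() or c.lower() in ('in', 'at', 'on', 'near', 'before')
--                       or (c.lower() not in skip and len(c) > 2)):
--                 return [c] + ([] if w.endswith('.') else pick(i + 1, n - 1))
--             if w.endswith('.'):
--                 return []
--             i += 1
--         return []
--
--     result = pick(0, 7)
--     return ' '.join(result) if result else desc[:50]
-- ===== Notes on version B (the rewrite author's own statement) =====
-- stated objective: alternative
-- what changed: A's two imperative loops (cut the word list at the first period-ending word, then filter into an accumulator with breaks at 7 words / sentence end) are replaced by a recursive pick(i, n) that builds the caption front-to-back by list concatenation, recursing only on kept words with the remaining word budget n and walking an index past unkept words, the sentence-ending word emptying the tail.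
import Mathlib
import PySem

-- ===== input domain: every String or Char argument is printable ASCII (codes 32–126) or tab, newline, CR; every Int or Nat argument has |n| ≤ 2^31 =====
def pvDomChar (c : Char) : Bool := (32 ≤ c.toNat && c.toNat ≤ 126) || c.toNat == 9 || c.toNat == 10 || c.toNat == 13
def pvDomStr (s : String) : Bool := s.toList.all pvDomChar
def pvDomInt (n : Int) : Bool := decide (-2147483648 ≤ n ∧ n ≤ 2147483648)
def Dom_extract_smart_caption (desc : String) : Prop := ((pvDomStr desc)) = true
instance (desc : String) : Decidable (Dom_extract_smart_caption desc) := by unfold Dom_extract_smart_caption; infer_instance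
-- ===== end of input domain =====

-- B replaces A's two imperative loops (sentence cut, then filter into an accumulator
-- with breaks) by a recursive pick building the caption front-to-back, recursing only
-- on kept words with a countdown budget; objective: alternative (same O(n) cost).

-- ===== PORT A =====
-- word.rstrip(',.;:') ported by hand (PySem has no rstrip-with-chars): drop those chars
-- from the right end only — exact for ASCII.
def pvRstrip (cs : List Char) : List Char :=
  (cs.reverse.dropWhile (fun c => c == ',' || c == '.' || c == ';' || c == ':')).reverse

def pvSkip : PySem.Set String := PySem.Set.ofList
  ["a", "an", "the", "is", "are", "was", "were", "has", "have", "had",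
   "and", "or", "but", "with", "by", "for", "to", "from", "of",
   "tall", "short", "out", "shape", "dressed", "appearing", "blurred",
   "contrasting", "standing", "sitting", "looking", "like"]

def pvLoc : List String := ["in", "at", "on", "near", "before"]

-- clean[0].isupper() (clean nonempty when used; [] branch unreachable)
def pvHeadUpper (clean : String) : Bool :=
  match clean.toList with
  | c :: _ => PySem.Chars.isupper c
  | [] => false

-- A's first loop: first_sentence
def pvFirstSentence : List String → List String
  | [] => []
  | w :: ws => if PySem.Str.endswith w "." then [w] else w :: pvFirstSentence ws

-- A's second loop
def pvBuildA : List String → List String → List String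
  | [], res => res
  | word :: rest, res =>
    let clean := String.ofList (pvRstrip word.toList)
    if clean = "" then pvBuildA rest res
    else
      let res' :=
        if pvHeadUpper clean || decide (PySem.Str.lower clean ∈ pvLoc) then res ++ [clean]
        else if !(PySem.Set.contains pvSkip (PySem.Str.lower clean))
                && decide (2 < PySem.Str.len clean) then res ++ [clean]
        else res
      if res'.length ≥ 7 then res' else pvBuildA rest res'

def extract_smart_caption (desc : String) : String :=
  if desc = "" then ""
  else
    let res := pvBuildA (pvFirstSentence (PySem.Str.split₀ desc)) []
    if res = [] then PySem.Str.slice desc none (some 50) else PySem.Str.join " " res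

-- ===== PORT B =====
-- the inline keep-condition of Source B's pick, named for reuse in the proofs
def pvKeep (clean : String) : Bool :=
  pvHeadUpper clean || decide (PySem.Str.lower clean ∈ pvLoc)
    || (!(PySem.Set.contains pvSkip (PySem.Str.lower clean))
        && decide (2 < PySem.Str.len clean))

-- Source B's pick: front-to-back construction, recursion only on kept words (budget n),
-- the index walk past unkept words is the n-preserving recursive call
def pvPick (words : List String) (i n : Nat) : List String :=
  match n with
  | 0 => []
  | Nat.succ m =>
    if h : i < words.length then
      let w := words[i]
      let c := String.ofList (pvRstrip w.toList)
      if c ≠ "" && pvKeep c then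
        [c] ++ (if PySem.Str.endswith w "." then [] else pvPick words (i + 1) m)
      else if PySem.Str.endswith w "." then []
      else pvPick words (i + 1) (Nat.succ m)
    else []
termination_by (n, words.length - i)
decreasing_by
  · exact Prod.Lex.left _ _ (Nat.lt_succ_self m)
  · exact Prod.Lex.right _ (by omega)

def extract_smart_caption_alt (desc : String) : String :=
  if desc = "" then ""
  else
    let res := pvPick (PySem.Str.split₀ desc) 0 7
    if res = [] then PySem.Str.slice desc none (some 50) else PySem.Str.join " " res

-- ===== PRECONDITION & SPEC =====
def Spec_extract_smart_caption (desc : String) (out : String) : Prop := out = extract_smart_caption_alt desc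
instance (desc : String) (out : String) : Decidable (Spec_extract_smart_caption desc out) := by unfold Spec_extract_smart_caption; infer_instance

-- ===== CLAIM (what is proved, stated in full; the proofs are below) =====
def Claim_equal_extract_smart_caption : Prop := ∀ (desc : String), Dom_extract_smart_caption desc → Spec_extract_smart_caption desc (extract_smart_caption desc)

-- ===== LEMMAS AND PROOFS =====

-- proof-only intermediate: pick as a recursion over the remaining word LIST
def pvPickL (words : List String) (n : Nat) : List String :=
  match words, n with
  | [], _ => []
  | _ :: _, 0 => []
  | w :: ws, Nat.succ m =>
    let rest := if PySem.Str.endswith w "." then ([] : List String) else ws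
    let c := String.ofList (pvRstrip w.toList)
    if c ≠ "" && pvKeep c then c :: pvPickL rest m
    else pvPickL rest (Nat.succ m)
termination_by words.length
decreasing_by
  all_goals split <;> simp

-- A's two-branch append step equals one append guarded by pvKeep
theorem stepEq (res : List String) (clean : String) :
    (if pvHeadUpper clean || decide (PySem.Str.lower clean ∈ pvLoc) then res ++ [clean]
     else if !(PySem.Set.contains pvSkip (PySem.Str.lower clean))
             && decide (2 < PySem.Str.len clean) then res ++ [clean]
     else res)
      = if pvKeep clean then res ++ [clean] else res := by
  have hkeq : pvKeep clean = ((pvHeadUpper clean || decide (PySem.Str.lower clean ∈ pvLoc))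
      || (!(PySem.Set.contains pvSkip (PySem.Str.lower clean))
          && decide (2 < PySem.Str.len clean))) := by
    unfold pvKeep; rw [Bool.or_assoc]
  rw [hkeq]
  cases h1 : (pvHeadUpper clean || decide (PySem.Str.lower clean ∈ pvLoc)) <;>
    cases h3 : (!(PySem.Set.contains pvSkip (PySem.Str.lower clean))
                && decide (2 < PySem.Str.len clean)) <;> simp

theorem buildA_nil (res : List String) : pvBuildA [] res = res := rfl

theorem buildA_cons (w : String) (rest res : List String) :
    pvBuildA (w :: rest) res =
      if String.ofList (pvRstrip w.toList) = "" then pvBuildA rest res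
      else if pvKeep (String.ofList (pvRstrip w.toList)) = true then
        (if (res ++ [String.ofList (pvRstrip w.toList)]).length ≥ 7
         then res ++ [String.ofList (pvRstrip w.toList)]
         else pvBuildA rest (res ++ [String.ofList (pvRstrip w.toList)]))
      else (if res.length ≥ 7 then res else pvBuildA rest res) := by
  simp only [pvBuildA, stepEq]
  by_cases hk : pvKeep (String.ofList (pvRstrip w.toList)) = true <;> simp [hk]

theorem pick_nil (n : Nat) : pvPickL [] n = [] := by
  rw [pvPickL.eq_def]

theorem pick_zero (ws : List String) : pvPickL ws 0 = [] := by
  cases ws <;> rw [pvPickL.eq_def]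

theorem pick_cons (w : String) (ws : List String) (m : Nat) :
    pvPickL (w :: ws) (m + 1) =
      if (decide (String.ofList (pvRstrip w.toList) ≠ "")
          && pvKeep (String.ofList (pvRstrip w.toList))) = true
      then String.ofList (pvRstrip w.toList)
             :: pvPickL (if PySem.Str.endswith w "." then [] else ws) m
      else pvPickL (if PySem.Str.endswith w "." then [] else ws) (m + 1) := by
  rw [pvPickL]

-- main invariant: A's accumulator loop on the cut list equals the recursive pick
theorem build_eq_pick (ws : List String) :
    ∀ res : List String, res.length < 7 →
      pvBuildA (pvFirstSentence ws) res = res ++ pvPickL ws (7 - res.length) := by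
  induction ws with
  | nil => intro res _; simp [pvFirstSentence, buildA_nil, pick_nil]
  | cons w ws ih =>
    intro res hlen
    have h7 : ¬ res.length ≥ 7 := by omega
    have hsub : 7 - res.length = (7 - res.length - 1) + 1 := by omega
    rw [hsub, pick_cons, pvFirstSentence]
    cases hE : PySem.Str.endswith w "." with
    | true =>
      simp only [reduceIte]
      rw [buildA_cons]
      by_cases hc : String.ofList (pvRstrip w.toList) = ""
      · have hbk : ¬ ((decide (String.ofList (pvRstrip w.toList) ≠ "")
            && pvKeep (String.ofList (pvRstrip w.toList))) = true) := by simp [hc]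
        rw [if_pos hc, if_neg hbk, buildA_nil, pick_nil, List.append_nil]
      · by_cases hk : pvKeep (String.ofList (pvRstrip w.toList)) = true
        · have hbk : (decide (String.ofList (pvRstrip w.toList) ≠ "")
              && pvKeep (String.ofList (pvRstrip w.toList))) = true := by simp [hc, hk]
          rw [if_neg hc, if_pos hk, if_pos hbk]
          by_cases hl : (res ++ [String.ofList (pvRstrip w.toList)]).length ≥ 7
          · rw [if_pos hl, pick_nil]
          · rw [if_neg hl, buildA_nil, pick_nil]
        · have hbk : ¬ ((decide (String.ofList (pvRstrip w.toList) ≠ "")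
              && pvKeep (String.ofList (pvRstrip w.toList))) = true) := by simp [hk]
          rw [if_neg hc, if_neg hk, if_neg hbk, if_neg h7, buildA_nil, pick_nil,
              List.append_nil]
    | false =>
      simp only [Bool.false_eq_true, reduceIte]
      rw [buildA_cons]
      by_cases hc : String.ofList (pvRstrip w.toList) = ""
      · have hbk : ¬ ((decide (String.ofList (pvRstrip w.toList) ≠ "")
            && pvKeep (String.ofList (pvRstrip w.toList))) = true) := by simp [hc]
        rw [if_pos hc, if_neg hbk, ← hsub]
        exact ih res hlen
      · by_cases hk : pvKeep (String.ofList (pvRstrip w.toList)) = true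
        · have hbk : (decide (String.ofList (pvRstrip w.toList) ≠ "")
              && pvKeep (String.ofList (pvRstrip w.toList))) = true := by simp [hc, hk]
          rw [if_neg hc, if_pos hk, if_pos hbk]
          by_cases hl : (res ++ [String.ofList (pvRstrip w.toList)]).length ≥ 7
          · rw [if_pos hl]
            have h0 : 7 - res.length - 1 = 0 := by
              simp only [List.length_append, List.length_cons, List.length_nil] at hl
              omega
            rw [h0, pick_zero]
          · have hl2 : (res ++ [String.ofList (pvRstrip w.toList)]).length < 7 := by omega
            rw [if_neg hl, ih _ hl2]
            have h1 : 7 - (res ++ [String.ofList (pvRstrip w.toList)]).length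
                = 7 - res.length - 1 := by
              simp only [List.length_append, List.length_cons, List.length_nil]
              omega
            rw [h1]
            simp
        · have hbk : ¬ ((decide (String.ofList (pvRstrip w.toList) ≠ "")
              && pvKeep (String.ofList (pvRstrip w.toList))) = true) := by simp [hk]
          rw [if_neg hc, if_neg hk, if_neg hbk, if_neg h7, ← hsub]
          exact ih res hlen


-- pvPickL unfolding on a cons, with the rest-if distributed
theorem pick_cons' (w : String) (ws : List String) (m : Nat) :
    pvPickL (w :: ws) (m + 1) =
      if (decide (String.ofList (pvRstrip w.toList) ≠ "")
          && pvKeep (String.ofList (pvRstrip w.toList))) = true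
      then if PySem.Str.endswith w "."
           then String.ofList (pvRstrip w.toList) :: pvPickL [] m
           else String.ofList (pvRstrip w.toList) :: pvPickL ws m
      else if PySem.Str.endswith w "." then pvPickL [] (m + 1)
      else pvPickL ws (m + 1) := by
  rw [pick_cons]
  cases hE : PySem.Str.endswith w "." <;> simp

-- B's index recursion equals the list recursion on the dropped suffix
theorem pick_eq_pickL : ∀ (k : Nat) (words : List String) (i : Nat),
    words.length - i = k → ∀ n, pvPick words i n = pvPickL (words.drop i) n := by
  intro k
  induction k with
  | zero =>
    intro words i hk n
    have hge : words.length ≤ i := by omega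
    have hd : words.drop i = [] := List.drop_eq_nil_of_le hge
    rw [hd, pick_nil]
    match n with
    | 0 => rw [pvPick.eq_def]
    | Nat.succ m => rw [pvPick.eq_def]; simp only [dif_neg (by omega : ¬ i < words.length)]
  | succ k ih =>
    intro words i hk n
    have hi : i < words.length := by omega
    have hd : words.drop i = words[i] :: words.drop (i + 1) :=
      (List.getElem_cons_drop hi).symm
    match n with
    | 0 => rw [pvPick.eq_def, hd, pick_zero]
    | Nat.succ m =>
      rw [pvPick.eq_def, hd, pick_cons']
      simp only [dif_pos hi]
      have ih' := ih words (i + 1) (by omega)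
      by_cases hbk : (decide (String.ofList (pvRstrip words[i].toList) ≠ "")
          && pvKeep (String.ofList (pvRstrip words[i].toList))) = true
      · rw [if_pos hbk, if_pos hbk]
        cases hE : PySem.Str.endswith words[i] "." with
        | true => simp [pick_nil]
        | false => simp [ih' m]
      · rw [if_neg hbk, if_neg hbk]
        cases hE : PySem.Str.endswith words[i] "." with
        | true => simp [pick_nil]
        | false => simp [ih' (m + 1)]

-- ===== VERDICT (by name: the statement is the Claim_ definition above) =====
theorem extract_smart_caption_spec : Claim_equal_extract_smart_caption := by
  intro desc _
  unfold Spec_extract_smart_caption extract_smart_caption extract_smart_caption_alt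
  by_cases h : desc = ""
  · simp [h]
  · rw [if_neg h, if_neg h, build_eq_pick _ [] (by simp),
        pick_eq_pickL _ _ 0 rfl 7, List.drop_zero]
    simp
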